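-- pv_equiv track=rewrite | github.com/geraud-g/advent-of-code | aoc_2018/day_05/day_05.py | part_one
-- ===== SOURCE A (Python) =====
-- from collections import deque
--
-- def part_one(initial_polymer: list[int]) -> int:
--     stack = deque()
--
--     for unit in initial_polymer:
--         if stack and abs(stack[-1] - unit) == 32:
--             stack.pop()
--         else:
--             stack.append(unit)
--     return len(stack)
-- ===== SOURCE B (Python) =====
-- def part_one(initial_polymer: list[int]) -> int:
--     p = list(initial_polymer)
--     while True:
--         removed = False
--         for i in range(len(p) - 1):
--             if abs(p[i] - p[i + 1]) == 32:
--                 del p[i:i + 2]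
--                 removed = True
--                 break
--         if not removed:
--             return len(p)
-- ===== Notes on version B (the rewrite author's own statement) =====
-- stated objective: alternative
-- what changed: Replaced the single stack pass with a rewriting loop: repeatedly scan for the leftmost adjacent cancelling pair, delete it and restart until a fixed point, then return the length.
import Mathlib
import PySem

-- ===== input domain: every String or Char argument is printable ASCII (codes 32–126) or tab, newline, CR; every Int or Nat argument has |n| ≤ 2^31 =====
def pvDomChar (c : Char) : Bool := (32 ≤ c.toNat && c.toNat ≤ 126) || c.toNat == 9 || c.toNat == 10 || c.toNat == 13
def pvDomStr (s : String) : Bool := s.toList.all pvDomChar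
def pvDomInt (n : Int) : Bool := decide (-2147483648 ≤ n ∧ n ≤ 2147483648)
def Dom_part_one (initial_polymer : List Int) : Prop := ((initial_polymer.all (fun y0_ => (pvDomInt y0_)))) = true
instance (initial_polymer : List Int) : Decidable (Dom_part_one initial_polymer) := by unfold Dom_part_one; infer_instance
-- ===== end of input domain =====

-- B replaces A's single stack pass with repeated leftmost-pair deletion to a fixed point (alternative algorithm, not faster).

-- ===== PORT A =====
-- A's deque is used purely as a stack (append / pop / peek at the same end);
-- ported as a List with its head as the stack top.
def pvStep (s : List Int) (unit : Int) : List Int :=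
  match s with
  | top :: rest => if (top - unit).natAbs = 32 then rest else unit :: top :: rest
  | [] => [unit]

def part_one (initial_polymer : List Int) : Int :=
  ((initial_polymer.foldl pvStep []).length : Int)

-- ===== PORT B =====
-- one scan of B's inner `for` loop: delete the leftmost adjacent cancelling
-- pair, or return none if no pair cancels (the pass removed nothing)
def pvScanOnce : List Int → Option (List Int)
  | x :: y :: r =>
      if (x - y).natAbs = 32 then some r
      else (pvScanOnce (y :: r)).map (fun q => x :: q)
  | _ => none

theorem pvScanOnce_some_lt : ∀ {p q : List Int}, pvScanOnce p = some q → q.length < p.length := by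
  intro p
  induction p with
  | nil => intro q h; simp [pvScanOnce] at h
  | cons x t ih =>
    intro q h
    match t with
    | [] => simp [pvScanOnce] at h
    | y :: r =>
      simp only [pvScanOnce] at h
      split at h
      · cases h; simp
      · rcases Option.map_eq_some_iff.mp h with ⟨q', hq', rfl⟩
        have := ih hq'
        simpa using Nat.succ_lt_succ this

-- B's outer `while` loop: repeat passes until one removes nothing
def pvReduceFix (p : List Int) : List Int :=
  match _h : pvScanOnce p with
  | some q => pvReduceFix q
  | none => p
termination_by p.length
decreasing_by exact pvScanOnce_some_lt _h

def part_one_alt (initial_polymer : List Int) : Int :=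
  ((pvReduceFix initial_polymer).length : Int)

-- ===== PRECONDITION & SPEC =====
def Spec_part_one (initial_polymer : List Int) (out : Int) : Prop := out = part_one_alt initial_polymer
instance (initial_polymer : List Int) (out : Int) : Decidable (Spec_part_one initial_polymer out) := by unfold Spec_part_one; infer_instance

-- ===== CLAIM (what is proved, stated in full; the proofs are below) =====
def Claim_equal_part_one : Prop := ∀ (initial_polymer : List Int), Dom_part_one initial_polymer → Spec_part_one initial_polymer (part_one initial_polymer)

-- ===== LEMMAS AND PROOFS =====

-- Guard condition relating the current stack to the head of the remaining input:
-- the stack top never cancels the next input element fed to the fold.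
def pvGuard (l s : List Int) : Prop :=
  ∀ x t, l = x :: t → ∀ z s', s = z :: s' → (z - x).natAbs ≠ 32

-- On a list with no adjacent cancelling pair, the stack pass just pushes everything.
theorem pv_foldl_nf : ∀ (l s : List Int), pvScanOnce l = none → pvGuard l s →
    List.foldl pvStep s l = l.reverse ++ s := by
  intro l
  induction l with
  | nil => intro s _ _; simp
  | cons x t ih =>
    intro s hnf hg
    have hpush : pvStep s x = x :: s := by
      cases s with
      | nil => rfl
      | cons z s' =>
        have := hg x t rfl z s' rfl
        simp [pvStep, this]
    have ht : pvScanOnce t = none ∧ pvGuard t (x :: s) := by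
      cases t with
      | nil => exact ⟨rfl, by intro a b hab; simp at hab⟩
      | cons y r =>
        simp only [pvScanOnce] at hnf
        split at hnf
        · simp at hnf
        · rename_i hxy
          constructor
          · simpa using hnf
          · intro a b hab z s' hzs
            cases hab; cases hzs
            exact hxy
    have := ih (x :: s) ht.1 ht.2
    simp only [List.foldl_cons, hpush, this, List.reverse_cons, List.append_assoc]
    simp
-- Deleting the leftmost cancelling pair does not change the stack pass's result.
theorem pv_foldl_step : ∀ (l q s : List Int), pvScanOnce l = some q → pvGuard l s →
    List.foldl pvStep s l = List.foldl pvStep s q := by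
  intro l
  induction l with
  | nil => intro q s h; simp [pvScanOnce] at h
  | cons x t ih =>
    intro q s h hg
    match t with
    | [] => simp [pvScanOnce] at h
    | y :: r =>
      have hpush : pvStep s x = x :: s := by
        cases s with
        | nil => rfl
        | cons z s' =>
          have := hg x (y :: r) rfl z s' rfl
          simp [pvStep, this]
      simp only [pvScanOnce] at h
      split at h
      · rename_i hxy
        cases h
        simp only [List.foldl_cons, hpush]
        have : pvStep (x :: s) y = s := by simp [pvStep, hxy]
        simp [this]
      · rename_i hxy
        rcases Option.map_eq_some_iff.mp h with ⟨q', hq', rfl⟩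
        have hg' : pvGuard (y :: r) (x :: s) := by
          intro a b hab z s' hzs
          cases hab; cases hzs
          exact hxy
        rw [List.foldl_cons, hpush, ih q' (x :: s) hq' hg']
        simp [hpush]

-- Main: the stack pass computes the reverse of B's fixed point.
theorem pv_stack_eq_fix : ∀ (l : List Int), List.foldl pvStep [] l = (pvReduceFix l).reverse := by
  intro l
  induction hn : l.length using Nat.strong_induction_on generalizing l with
  | _ n ih =>
    unfold pvReduceFix
    cases h : pvScanOnce l with
    | none =>
      have := pv_foldl_nf l [] h (by intro a b _ z s' hzs; simp at hzs)
      simpa using this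
    | some q =>
      have h1 := pv_foldl_step l q [] h (by intro a b _ z s' hzs; simp at hzs)
      have h2 := pvScanOnce_some_lt h
      rw [h1]
      exact ih q.length (by omega) q rfl

-- ===== VERDICT (by name: the statement is the Claim_ definition above) =====
theorem part_one_spec : Claim_equal_part_one := by
  intro l _
  unfold Spec_part_one part_one part_one_alt
  rw [pv_stack_eq_fix]
  simp
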